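-- pv_equiv track=rewrite | github.com/cirosantilli/project-euler-solvers | solvers/590.py | H_small
-- ===== SOURCE A (Python) =====
-- def factorize(n: int) -> list[tuple[int, int]]:
--     """Trial-division factorization (sufficient for tiny n in asserts)."""
--     res = []
--     d = 2
--     while d * d <= n:
--         if n % d == 0:
--             e = 0
--             while n % d == 0:
--                 n //= d
--                 e += 1
--             res.append((d, e))
--         d += 1 if d == 2 else 2  # 2 then odd numbers
--     if n > 1:
--         res.append((n, 1))
--     return res
--
-- def H_small(n: int) -> int:
--     """Compute H(n) exactly for small n via inclusion-exclusion over its primes.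
--
--     For n > 1:
--       H(n) = sum_{A subset of primes(n)} (-1)^|A| * 2^{d(n / prod_{p in A} p)}
--
--     Special case: H(1) = 1 (only set {1}).
--     """
--     if n == 1:
--         return 1
--
--     factors = factorize(n)
--     primes = [p for p, _ in factors]
--     exps = [e for _, e in factors]
--     k = len(primes)
--
--     total = 0
--     for mask in range(1 << k):
--         bits = 0
--         divcount = 1
--         for i in range(k):
--             if (mask >> i) & 1:
--                 bits += 1
--                 divcount *= exps[i]  # exponent reduced by 1 => (e-1)+1 = e
--             else:
--                 divcount *= exps[i] + 1
--         term = 1 << divcount  # 2^divcount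
--         if bits & 1:
--             total -= term
--         else:
--             total += term
--     return total
-- ===== SOURCE B (Python) =====
-- def factorize(n: int) -> list[tuple[int, int]]:
--     """Trial-division factorization (sufficient for tiny n in asserts)."""
--     res = []
--     d = 2
--     while d * d <= n:
--         if n % d == 0:
--             e = 0
--             while n % d == 0:
--                 n //= d
--                 e += 1
--             res.append((d, e))
--         d += 1 if d == 2 else 2  # 2 then odd numbers
--     if n > 1:
--         res.append((n, 1))
--     return res
--
-- def H_small(n: int) -> int:
--     """H(n) by a recursive include/exclude walk over the prime exponents."""
--     if n == 1:
--         return 1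
--     exps = [e for _, e in factorize(n)]
--
--     def walk(i: int, divcount: int, odd: bool) -> int:
--         if i == len(exps):
--             t = 1 << divcount
--             return -t if odd else t
--         return (walk(i + 1, divcount * (exps[i] + 1), odd)
--                 + walk(i + 1, divcount * exps[i], not odd))
--
--     return walk(0, 1, False)
-- ===== Notes on version B (the rewrite author's own statement) =====
-- stated objective: alternative
-- what changed: The 2^k bitmask double loop (outer mask enumeration, inner per-bit scan recomputing parity and the divisor-count product) is replaced by a single recursive include/exclude walk over the exponent list that carries the running product and parity down the call tree and sums the two branches at each prime.
import Mathlib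
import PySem

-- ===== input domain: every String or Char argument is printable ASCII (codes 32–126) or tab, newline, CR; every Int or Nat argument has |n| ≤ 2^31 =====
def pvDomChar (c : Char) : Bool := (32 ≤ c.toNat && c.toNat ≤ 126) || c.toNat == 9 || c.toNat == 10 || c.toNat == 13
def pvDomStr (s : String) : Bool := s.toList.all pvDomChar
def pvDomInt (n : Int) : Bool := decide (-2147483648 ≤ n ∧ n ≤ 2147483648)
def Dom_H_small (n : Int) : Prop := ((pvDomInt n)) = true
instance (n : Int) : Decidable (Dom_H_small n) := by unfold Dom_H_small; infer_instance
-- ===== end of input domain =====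

-- B replaces A's 2^k bitmask double loop by one recursive include/exclude walk over the
-- exponent list carrying the running divisor-count product and a parity flag (objective:
-- alternative decomposition, same exponential term count).

-- ===== PORT A =====

-- inner `while n % d == 0` loop of factorize. The fuel argument only totalizes the
-- recursion: every call factorize makes has n >= 4 and d >= 2, where the loop runs at most
-- log2 n < fuel times, so the fuel is never exhausted and the loop is Python-exact.
def pvDivOut (fuel : Nat) (n d e : Int) : Int × Int :=
  match fuel with
  | 0 => (n, e)
  | f + 1 =>
    if PySem.Int.mod n d = 0 then pvDivOut f (PySem.Int.floordiv n d) d (e + 1)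
    else (n, e)

-- outer `while d * d <= n` loop of factorize; d grows every iteration, so the loop runs
-- at most n times and the fuel (n.toNat + 1 at the call site) is never exhausted.
def pvFactorLoop (fuel : Nat) (n d : Int) (res : List (Int × Int)) : Int × List (Int × Int) :=
  match fuel with
  | 0 => (n, res)
  | f + 1 =>
    if d * d ≤ n then
      if PySem.Int.mod n d = 0 then
        let p := pvDivOut (n.toNat + 1) n d 0
        pvFactorLoop f p.1 (d + if d = 2 then 1 else 2) (res ++ [(d, p.2)])
      else
        pvFactorLoop f n (d + if d = 2 then 1 else 2) res
    else (n, res)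

def factorize (n : Int) : List (Int × Int) :=
  let r := pvFactorLoop (n.toNat + 1) n 2 []
  if r.1 > 1 then r.2 ++ [(r.1, 1)] else r.2

def H_small (n : Int) : Int :=
  if n = 1 then 1
  else
    let factors := factorize n
    let primes := factors.map (fun pe => pe.1)
    let exps := factors.map (fun pe => pe.2)
    let k := primes.length
    (List.range (2 ^ k)).foldl
      (fun total mask =>
        -- i and mask come from range, hence nonnegative: exps[i] is List.getD, `&` is Nat &&&
        let s := (List.range k).foldl
          (fun (st : Nat × Int) i =>
            if (mask >>> i) &&& 1 = 1 then (st.1 + 1, st.2 * exps.getD i 0)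
            else (st.1, st.2 * (exps.getD i 0 + 1))) (0, 1)
        let term : Int := 2 ^ s.2.toNat  -- 1 << divcount; divcount ≥ 1 on every reachable state
        if s.1 &&& 1 = 1 then total - term else total + term) 0

-- ===== PORT B =====

-- walk(i, divcount, odd) of Source B, as structural recursion on the exponent suffix exps[i:]
def pvWalk (exps : List Int) (divcount : Int) (odd : Bool) : Int :=
  match exps with
  | [] =>
    let t : Int := 2 ^ divcount.toNat  -- 1 << divcount; divcount ≥ 1 on every reachable state
    if odd then -t else t
  | e :: rest => pvWalk rest (divcount * (e + 1)) odd + pvWalk rest (divcount * e) (!odd)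

def H_small_alt (n : Int) : Int :=
  if n = 1 then 1
  else pvWalk ((factorize n).map (fun pe => pe.2)) 1 false

-- ===== PRECONDITION & SPEC =====
def Spec_H_small (n : Int) (out : Int) : Prop := out = H_small_alt n
instance (n : Int) (out : Int) : Decidable (Spec_H_small n out) := by unfold Spec_H_small; infer_instance

-- ===== CLAIM (what is proved, stated in full; the proofs are below) =====
def Claim_equal_H_small : Prop := ∀ (n : Int), Dom_H_small n → Spec_H_small n (H_small n)

-- ===== LEMMAS AND PROOFS =====

-- A's inner per-bit fold, with the initial state generalized
def pvInner (exps : List Int) (mask : Nat) (st : Nat × Int) : Nat × Int :=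
  (List.range exps.length).foldl
    (fun st i =>
      if (mask >>> i) &&& 1 = 1 then (st.1 + 1, st.2 * exps.getD i 0)
      else (st.1, st.2 * (exps.getD i 0 + 1))) st

def pvFinish (st : Nat × Int) : Int :=
  if st.1 &&& 1 = 1 then -(2 ^ st.2.toNat) else (2 ^ st.2.toNat : Int)

lemma pvInner_cons (e : Int) (rest : List Int) (mask : Nat) (st : Nat × Int) :
    pvInner (e :: rest) mask st =
      pvInner rest (mask >>> 1)
        (if mask &&& 1 = 1 then (st.1 + 1, st.2 * e) else (st.1, st.2 * (e + 1))) := by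
  unfold pvInner
  rw [List.length_cons, List.range_succ_eq_map, List.foldl_cons, List.foldl_map]
  simp only [Nat.shiftRight_zero, List.getD_cons_succ, List.getD_cons_zero]
  congr 1
  funext st i
  rw [← Nat.shiftRight_add, Nat.add_comm 1 i]

lemma pv_interleave (f : Nat → Int) (N : Nat) :
    ((List.range (2 * N)).map f).sum
      = ((List.range N).map (fun m => f (2 * m) + f (2 * m + 1))).sum := by
  induction N with
  | zero => simp
  | succ n ih =>
    have h : 2 * (n + 1) = (2 * n) + 1 + 1 := by omega
    rw [h, List.range_succ, List.range_succ, List.range_succ]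
    simp only [List.map_append, List.sum_append, ih, List.map_cons, List.map_nil,
      List.sum_cons, List.sum_nil]
    ring

lemma pv_parity_flip (b : Nat) : (((b + 1) &&& 1 == 1) : Bool) = !(b &&& 1 == 1) := by
  simp only [Nat.and_one_is_mod]
  have h : (b + 1) % 2 = 1 - b % 2 := by omega
  have h2 : b % 2 = 0 ∨ b % 2 = 1 := by omega
  rcases h2 with h2 | h2 <;> simp [h, h2]

lemma pv_main (exps : List Int) : ∀ (st : Nat × Int),
    ((List.range (2 ^ exps.length)).map (fun mask => pvFinish (pvInner exps mask st))).sum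
      = pvWalk exps st.2 (st.1 &&& 1 == 1) := by
  induction exps with
  | nil =>
    intro st
    by_cases h : st.1 &&& 1 = 1 <;> simp [pvInner, pvFinish, pvWalk, h]
  | cons e rest ih =>
    intro st
    have h2 : 2 ^ (e :: rest).length = 2 * 2 ^ rest.length := by
      rw [List.length_cons, pow_succ, Nat.mul_comm]
    have e0 : ∀ m : Nat, (2 * m) &&& 1 = 0 := by intro m; rw [Nat.and_one_is_mod]; omega
    have e1 : ∀ m : Nat, (2 * m + 1) &&& 1 = 1 := by intro m; rw [Nat.and_one_is_mod]; omega
    have s0 : ∀ m : Nat, (2 * m) >>> 1 = m := by intro m; rw [Nat.shiftRight_one]; omega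
    have s1 : ∀ m : Nat, (2 * m + 1) >>> 1 = m := by intro m; rw [Nat.shiftRight_one]; omega
    rw [h2, pv_interleave]
    simp only [pvInner_cons, e0, e1, s0, s1, Nat.zero_ne_one, if_false, if_true]
    rw [PySem.List.sum_map_add_int]
    rw [ih (st.1, st.2 * (e + 1)), ih (st.1 + 1, st.2 * e)]
    simp only [pvWalk, pv_parity_flip]

lemma pv_foldl_sum (l : List Nat) (t0 : Int) (f : Nat → Int) :
    l.foldl (fun t m => t + f m) t0 = t0 + (l.map f).sum := by
  induction l generalizing t0 with
  | nil => simp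
  | cons x xs ih => simp [ih, add_assoc]

lemma pv_A_fold (exps : List Int) :
    (List.range (2 ^ exps.length)).foldl
      (fun total mask =>
        let s := (List.range exps.length).foldl
          (fun (st : Nat × Int) i =>
            if (mask >>> i) &&& 1 = 1 then (st.1 + 1, st.2 * exps.getD i 0)
            else (st.1, st.2 * (exps.getD i 0 + 1))) (0, 1)
        let term : Int := 2 ^ s.2.toNat
        if s.1 &&& 1 = 1 then total - term else total + term) 0
    = pvWalk exps 1 false := by
  have hf : (fun (total : Int) (mask : Nat) =>
        let s := (List.range exps.length).foldl
          (fun (st : Nat × Int) i =>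
            if (mask >>> i) &&& 1 = 1 then (st.1 + 1, st.2 * exps.getD i 0)
            else (st.1, st.2 * (exps.getD i 0 + 1))) (0, 1)
        let term : Int := 2 ^ s.2.toNat
        if s.1 &&& 1 = 1 then total - term else total + term)
      = fun total mask => total + pvFinish (pvInner exps mask (0, 1)) := by
    funext t m
    simp only [pvInner, pvFinish]
    split <;> ring
  rw [hf, pv_foldl_sum, pv_main exps (0, 1)]
  simp

-- ===== VERDICT (by name: the statement is the Claim_ definition above) =====
theorem H_small_spec : Claim_equal_H_small := by
  intro n _
  unfold Spec_H_small H_small H_small_alt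
  by_cases h1 : n = 1
  · simp [h1]
  · simp only [h1, if_false]
    have := pv_A_fold ((factorize n).map (fun pe => pe.2))
    simpa [List.length_map] using this
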